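-- pv_equiv track=rewrite | github.com/noaham/pyAMBC | tableaux.py | outer_addrem
-- ===== SOURCE A (Python) =====
-- def is_partition(L):
--     # checks if a list of integers is a partition (i.e. is it weakly decreasing)
--     for i in range(len(L))[:-1]:
--         if L[i+1] > L[i]:
--             return False
--     return True
--
-- def outer_addrem(lam):
--     # produces a list of outer addable and removable boxes of the partition (i.e. boxes
--     # that can be added or removed on the southeast edge)
--     addables = []
--     removables = []
--     for i in range(1,len(lam)+1):
--         j = lam[i-1]+1
--         newpart = lam[:]
--         newpart[i-1] += 1
--         if is_partition(newpart):
--             addables.append((i,j))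
--         j = lam[i-1]
--         newpart = lam[:]
--         newpart[i-1] -= 1
--         if is_partition(newpart):
--             removables.append((i,j))
--     addables += [(len(lam)+1,1)]
--     return [addables,removables]
-- ===== SOURCE B (Python) =====
-- def outer_addrem(lam):
--     # O(n): precompute descent violations once; each row's add/remove test is a
--     # local neighbour comparison plus "no violation elsewhere".
--     n = len(lam)
--     viol = [1 if lam[k+1] > lam[k] else 0 for k in range(n-1)]
--     total = sum(viol)
--     addables = []
--     removables = []
--     for r in range(n):
--         others = total - (viol[r-1] if r > 0 else 0) - (viol[r] if r < n-1 else 0)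
--         if others == 0 and (r == 0 or lam[r-1] >= lam[r]+1) and (r == n-1 or lam[r]+1 >= lam[r+1]):
--             addables.append((r+1, lam[r]+1))
--         if others == 0 and (r == 0 or lam[r-1] >= lam[r]-1) and (r == n-1 or lam[r]-1 >= lam[r+1]):
--             removables.append((r+1, lam[r]))
--     addables.append((n+1, 1))
--     return [addables, removables]
-- ===== Notes on version B (the rewrite author's own statement) =====
-- stated objective: faster
-- what changed: Replaces A's per-row copy-and-full-rescan is_partition test (O(n^2)) by a single precomputed descent-violation table, so each row's addable/removable test is an O(1) local neighbour comparison plus a 'no violation elsewhere' count.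
import Mathlib
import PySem

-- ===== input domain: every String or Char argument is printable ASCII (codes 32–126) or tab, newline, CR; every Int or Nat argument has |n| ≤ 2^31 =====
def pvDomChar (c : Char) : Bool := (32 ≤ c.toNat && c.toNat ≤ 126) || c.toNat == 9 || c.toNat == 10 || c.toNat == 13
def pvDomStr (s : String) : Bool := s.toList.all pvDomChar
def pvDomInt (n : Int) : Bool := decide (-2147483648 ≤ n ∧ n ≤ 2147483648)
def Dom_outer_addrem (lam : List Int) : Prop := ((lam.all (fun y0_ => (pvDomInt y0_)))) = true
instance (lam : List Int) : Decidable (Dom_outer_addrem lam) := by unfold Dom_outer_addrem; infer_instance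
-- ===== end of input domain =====

-- B replaces A's per-row full is_partition re-scan by one precomputed descent-violation
-- table plus O(1) local neighbour comparisons per row (alternative single-pass algorithm).

-- ===== PORT A =====
-- 'for i in range(len(L))[:-1]: if L[i+1] > L[i]: return False / return True' — early return ≡ List.all
def is_partition (L : List Int) : Bool :=
  (PySem.List.slice (PySem.List.pyRange 0 (L.length : Int) 1) none (some (-1))).all
    (fun i => !(decide (PySem.List.pyGetD L i 0 < PySem.List.pyGetD L (i+1) 0)))


def outer_addrem (lam : List Int) : List (List (Int × Int)) :=
  let n : Int := lam.length
  let p := (PySem.List.pyRange 1 (n+1) 1).foldl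
    (fun (st : List (Int × Int) × List (Int × Int)) i =>
      let j := PySem.List.pyGetD lam (i-1) 0 + 1
      let newpart := PySem.List.pySetD lam (i-1) (PySem.List.pyGetD lam (i-1) 0 + 1)
      let st := if is_partition newpart then (st.1 ++ [(i, j)], st.2) else st
      let j2 := PySem.List.pyGetD lam (i-1) 0
      let newpart2 := PySem.List.pySetD lam (i-1) (PySem.List.pyGetD lam (i-1) 0 - 1)
      if is_partition newpart2 then (st.1, st.2 ++ [(i, j2)]) else st)
    ([], [])
  [p.1 ++ [(n+1, 1)], p.2]

-- ===== PORT B =====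
def outer_addrem_alt (lam : List Int) : List (List (Int × Int)) :=
  let n := lam.length
  let viol := (List.range (n-1)).map (fun k => if lam.getD (k+1) 0 > lam.getD k 0 then (1:Int) else 0)
  let total := viol.sum
  let p := (List.range n).foldl
    (fun (st : List (Int × Int) × List (Int × Int)) r =>
      let others := total - (if 0 < r then viol.getD (r-1) 0 else 0)
                          - (if r < n-1 then viol.getD r 0 else 0)
      let st := if others = 0 ∧ (r = 0 ∨ lam.getD (r-1) 0 ≥ lam.getD r 0 + 1)
                    ∧ (r = n-1 ∨ lam.getD r 0 + 1 ≥ lam.getD (r+1) 0)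
        then (st.1 ++ [((r:Int)+1, lam.getD r 0 + 1)], st.2) else st
      if others = 0 ∧ (r = 0 ∨ lam.getD (r-1) 0 ≥ lam.getD r 0 - 1)
          ∧ (r = n-1 ∨ lam.getD r 0 - 1 ≥ lam.getD (r+1) 0)
        then (st.1, st.2 ++ [((r:Int)+1, lam.getD r 0)]) else st)
    ([], [])
  [p.1 ++ [((n:Int)+1, 1)], p.2]

-- ===== PRECONDITION & SPEC =====
def Spec_outer_addrem (lam : List Int) (out : List (List (Int × Int))) : Prop := out = outer_addrem_alt lam
instance (lam : List Int) (out : List (List (Int × Int))) : Decidable (Spec_outer_addrem lam out) := by unfold Spec_outer_addrem; infer_instance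

-- ===== CLAIM (what is proved, stated in full; the proofs are below) =====
def Claim_equal_outer_addrem : Prop := ∀ (lam : List Int), Dom_outer_addrem lam → Spec_outer_addrem lam (outer_addrem lam)

-- ===== LEMMAS AND PROOFS =====

lemma pyRange_zero_nat_map (n : Nat) :
    PySem.List.pyRange 0 (n:Int) 1 = (List.range n).map (fun k => Int.ofNat k) := by
  simp only [PySem.List.pyRange_zero_natCast]
  rfl

lemma idx (n : Nat) :
    (PySem.List.pyRange 0 (n:Int) 1).dropLast = (List.range (n-1)).map (fun k => Int.ofNat k) := by
  cases n with
  | zero => simp [PySem.List.pyRange_one_eq_nil]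
  | succ m =>
    rw [show ((m+1:Nat):Int) = (m:Int)+1 by push_cast; ring]
    rw [PySem.List.pyRange_one_succ_right (by positivity)]
    rw [List.dropLast_concat]
    simp [pyRange_zero_nat_map]

lemma is_partition_iff (L : List Int) :
    is_partition L = true ↔ ∀ k, k + 1 < L.length → L.getD (k+1) 0 ≤ L.getD k 0 := by
  unfold is_partition
  rw [PySem.List.slice_to_neg_one, idx]
  rw [List.all_eq_true]
  constructor
  · intro h k hk
    have := h ((k:Int)) (List.mem_map.mpr ⟨k, List.mem_range.mpr (by omega), rfl⟩)
    simp only [Bool.not_eq_eq_eq_not, Bool.not_true, decide_eq_false_iff_not, not_lt] at this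
    have h1 : ((k:Int)+1) = ((k+1:Nat):Int) := by push_cast; ring
    rw [h1, PySem.List.pyGetD_natCast, PySem.List.pyGetD_natCast] at this
    exact this
  · intro h x hx
    obtain ⟨k, hk, rfl⟩ := List.mem_map.mp hx
    have hk' := List.mem_range.mp hk
    have := h k (by omega)
    simp only [Int.ofNat_eq_natCast, Bool.not_eq_eq_eq_not, Bool.not_true, decide_eq_false_iff_not, not_lt]
    have h1 : ((k:Int)+1) = ((k+1:Nat):Int) := by push_cast; ring
    rw [h1, PySem.List.pyGetD_natCast, PySem.List.pyGetD_natCast]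
    exact this

def pvInd (lam : List Int) (k : Nat) : Int :=
  if lam.getD (k+1) 0 > lam.getD k 0 then 1 else 0

lemma pvInd_nonneg (lam : List Int) (k : Nat) : 0 ≤ pvInd lam k := by
  unfold pvInd; split <;> norm_num

lemma pvInd_eq_zero (lam : List Int) (k : Nat) :
    pvInd lam k = 0 ↔ lam.getD (k+1) 0 ≤ lam.getD k 0 := by
  unfold pvInd; split <;> rename_i h <;> constructor <;> intro h2 <;> omega

lemma sum_map_range_eq_finset (f : Nat → Int) (m : Nat) :
    ((List.range m).map f).sum = ∑ k ∈ Finset.range m, f k := by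
  induction m with
  | zero => simp
  | succ m ih => simp [List.range_succ, Finset.sum_range_succ, ih]

lemma getD_map_range' (f : Nat → Int) (m r : Nat) (h : r < m) :
    ((List.range m).map f).getD r 0 = f r := by
  rw [List.getD_eq_getElem _ _ (by simpa using h)]
  simp

lemma getD_set' (lam : List Int) (r : Nat) (v : Int) (j : Nat) :
    (lam.set r v).getD j 0 = if j = r ∧ j < lam.length then v else lam.getD j 0 := by
  by_cases hj : j < lam.length
  · rw [List.getD_eq_getElem _ _ (by simpa using hj)]
    by_cases hjr : j = r
    · subst hjr; simp [hj]
    · rw [List.getElem_set_ne (by omega)]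
      rw [if_neg (by simp [hjr])]
      exact (List.getD_eq_getElem _ _ hj).symm
  · rw [List.getD_eq_default _ _ (by simpa using hj), List.getD_eq_default _ _ (by omega)]
    simp [hj]

lemma others_eq_sum (lam : List Int) (r : Nat) (hr : r < lam.length) :
    (∑ k ∈ Finset.range (lam.length - 1), pvInd lam k)
      - (if 0 < r then pvInd lam (r-1) else 0)
      - (if r < lam.length - 1 then pvInd lam r else 0)
    = ∑ k ∈ (Finset.range (lam.length - 1)).filter
        (fun k => ¬((0 < r ∧ k = r-1) ∨ k = r)), pvInd lam k := by
  classical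
  rw [← Finset.sum_filter_add_sum_filter_not (Finset.range (lam.length - 1))
      (fun k => ((0 < r ∧ k = r-1) ∨ k = r))]
  have hsum : ∑ k ∈ (Finset.range (lam.length - 1)).filter
      (fun k => ((0 < r ∧ k = r-1) ∨ k = r)), pvInd lam k
      = (if 0 < r then pvInd lam (r-1) else 0) + (if r < lam.length - 1 then pvInd lam r else 0) := by
    by_cases h0 : 0 < r
    · by_cases h1 : r < lam.length - 1
      · rw [show (Finset.range (lam.length - 1)).filter (fun k => ((0 < r ∧ k = r-1) ∨ k = r))
            = {r-1, r} by ext k; simp [Finset.mem_filter, Finset.mem_range]; omega]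
        rw [Finset.sum_pair (by omega)]
        simp [h0, h1]
      · rw [show (Finset.range (lam.length - 1)).filter (fun k => ((0 < r ∧ k = r-1) ∨ k = r))
            = {r-1} by ext k; simp [Finset.mem_filter, Finset.mem_range]; omega]
        simp [h0, h1]
    · by_cases h1 : r < lam.length - 1
      · rw [show (Finset.range (lam.length - 1)).filter (fun k => ((0 < r ∧ k = r-1) ∨ k = r))
            = {r} by ext k; simp [Finset.mem_filter, Finset.mem_range]; omega]
        simp [h0, h1]
      · rw [show (Finset.range (lam.length - 1)).filter (fun k => ((0 < r ∧ k = r-1) ∨ k = r))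
            = ∅ by ext k; simp [Finset.mem_filter, Finset.mem_range]; omega]
        simp [h0, h1]
  rw [hsum]; ring

lemma key (lam : List Int) (r : Nat) (hr : r < lam.length) (v : Int) :
    (is_partition (lam.set r v) = true) ↔
      ((∑ k ∈ (Finset.range (lam.length - 1)).filter
          (fun k => ¬((0 < r ∧ k = r-1) ∨ k = r)), pvInd lam k) = 0
        ∧ (r = 0 ∨ lam.getD (r-1) 0 ≥ v) ∧ (r = lam.length - 1 ∨ v ≥ lam.getD (r+1) 0)) := by
  classical
  rw [is_partition_iff]
  simp only [List.length_set]
  constructor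
  · intro h
    refine ⟨Finset.sum_eq_zero ?_, ?_, ?_⟩
    · intro k hk
      simp only [Finset.mem_filter, Finset.mem_range] at hk
      obtain ⟨hk1, hk2⟩ := hk
      have hp := h k (by omega)
      rw [getD_set', getD_set'] at hp
      rw [if_neg (by omega), if_neg (by omega)] at hp
      exact (pvInd_eq_zero lam k).mpr hp
    · by_cases h0 : r = 0
      · exact Or.inl h0
      · refine Or.inr ?_
        have hp := h (r-1) (by omega)
        rw [getD_set', getD_set'] at hp
        rw [if_pos (by omega), if_neg (by omega)] at hp
        exact hp
    · by_cases h1 : r = lam.length - 1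
      · exact Or.inl h1
      · refine Or.inr ?_
        have hp := h r (by omega)
        rw [getD_set', getD_set'] at hp
        rw [if_neg (by omega), if_pos (by omega)] at hp
        exact hp
  · rintro ⟨hz, hl, hrt⟩ k hk
    rw [getD_set', getD_set']
    by_cases hkr : k = r
    · subst hkr
      rw [if_neg (by omega), if_pos (by omega)]
      rcases hrt with h1 | h1
      · omega
      · exact h1
    · by_cases hkr1 : k + 1 = r
      · rw [if_pos (by omega), if_neg (by omega)]
        rcases hl with h1 | h1
        · omega
        · rw [show k = r - 1 by omega]; exact h1
      · rw [if_neg (by omega), if_neg (by omega)]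
        have : pvInd lam k = 0 := by
          have hk' : k ∈ (Finset.range (lam.length - 1)).filter
              (fun k => ¬((0 < r ∧ k = r-1) ∨ k = r)) := by
            simp only [Finset.mem_filter, Finset.mem_range]
            exact ⟨by omega, by omega⟩
          exact Finset.sum_eq_zero_iff_of_nonneg
            (fun k _ => pvInd_nonneg lam k) |>.mp hz k hk'
        exact (pvInd_eq_zero lam k).mp this
lemma foldl_pairAppend {α β : Type} (step : List β × List β → α → List β × List β)
    (f g : α → List β)
    (h : ∀ st i, step st i = (st.1 ++ f i, st.2 ++ g i)) :
    ∀ (xs : List α) (a b : List β),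
      xs.foldl step (a, b) = (a ++ xs.flatMap f, b ++ xs.flatMap g) := by
  intro xs
  induction xs with
  | nil => intro a b; simp
  | cons x xs ih => intro a b; rw [List.foldl_cons, h]; simp [ih]

lemma flatMap_congr_mem {α β : Type} (l : List α) (f g : α → List β)
    (h : ∀ x ∈ l, f x = g x) : l.flatMap f = l.flatMap g := by
  induction l with
  | nil => rfl
  | cons x xs ih =>
    simp only [List.flatMap_cons, h x (by simp)]
    rw [ih (fun y hy => h y (by simp [hy]))]

lemma others_eq_sum' (lam : List Int) (r : Nat) (hr : r < lam.length) :
    ((List.range (lam.length-1)).map (fun k => if lam.getD (k+1) 0 > lam.getD k 0 then (1:Int) else 0)).sum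
      - (if 0 < r then ((List.range (lam.length-1)).map (fun k => if lam.getD (k+1) 0 > lam.getD k 0 then (1:Int) else 0)).getD (r-1) 0 else 0)
      - (if r < lam.length-1 then ((List.range (lam.length-1)).map (fun k => if lam.getD (k+1) 0 > lam.getD k 0 then (1:Int) else 0)).getD r 0 else 0)
    = ∑ k ∈ (Finset.range (lam.length - 1)).filter
        (fun k => ¬((0 < r ∧ k = r-1) ∨ k = r)), pvInd lam k := by
  have hf : (fun k => if lam.getD (k+1) 0 > lam.getD k 0 then (1:Int) else 0) = pvInd lam := rfl
  rw [hf, sum_map_range_eq_finset]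
  rw [show (if 0 < r then ((List.range (lam.length-1)).map (pvInd lam)).getD (r-1) 0 else 0)
      = (if 0 < r then pvInd lam (r-1) else 0) by
    split_ifs with h
    · exact getD_map_range' _ _ _ (by omega)
    · rfl]
  rw [show (if r < lam.length-1 then ((List.range (lam.length-1)).map (pvInd lam)).getD r 0 else 0)
      = (if r < lam.length-1 then pvInd lam r else 0) by
    split_ifs with h
    · exact getD_map_range' _ _ _ (by omega)
    · rfl]
  exact others_eq_sum lam r hr

lemma ports_agree (lam : List Int) : outer_addrem lam = outer_addrem_alt lam := by
  unfold outer_addrem outer_addrem_alt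
  dsimp only
  rw [foldl_pairAppend _
    (fun i => if is_partition (PySem.List.pySetD lam (i-1) (PySem.List.pyGetD lam (i-1) 0 + 1)) then [(i, PySem.List.pyGetD lam (i-1) 0 + 1)] else [])
    (fun i => if is_partition (PySem.List.pySetD lam (i-1) (PySem.List.pyGetD lam (i-1) 0 - 1)) then [(i, PySem.List.pyGetD lam (i-1) 0)] else [])
    (by intro st i; dsimp only; split_ifs <;> simp)]
  rw [foldl_pairAppend _
    (fun r => if (((List.range (lam.length-1)).map (fun k => if lam.getD (k+1) 0 > lam.getD k 0 then (1:Int) else 0)).sum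
          - (if 0 < r then ((List.range (lam.length-1)).map (fun k => if lam.getD (k+1) 0 > lam.getD k 0 then (1:Int) else 0)).getD (r-1) 0 else 0)
          - (if r < lam.length-1 then ((List.range (lam.length-1)).map (fun k => if lam.getD (k+1) 0 > lam.getD k 0 then (1:Int) else 0)).getD r 0 else 0)) = 0
        ∧ (r = 0 ∨ lam.getD (r-1) 0 ≥ lam.getD r 0 + 1) ∧ (r = lam.length-1 ∨ lam.getD r 0 + 1 ≥ lam.getD (r+1) 0)
      then [((r:Int)+1, lam.getD r 0 + 1)] else [])
    (fun r => if (((List.range (lam.length-1)).map (fun k => if lam.getD (k+1) 0 > lam.getD k 0 then (1:Int) else 0)).sum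
          - (if 0 < r then ((List.range (lam.length-1)).map (fun k => if lam.getD (k+1) 0 > lam.getD k 0 then (1:Int) else 0)).getD (r-1) 0 else 0)
          - (if r < lam.length-1 then ((List.range (lam.length-1)).map (fun k => if lam.getD (k+1) 0 > lam.getD k 0 then (1:Int) else 0)).getD r 0 else 0)) = 0
        ∧ (r = 0 ∨ lam.getD (r-1) 0 ≥ lam.getD r 0 - 1) ∧ (r = lam.length-1 ∨ lam.getD r 0 - 1 ≥ lam.getD (r+1) 0)
      then [((r:Int)+1, lam.getD r 0)] else [])
    (by intro st r; dsimp only; split_ifs <;> simp)]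
  simp only [List.nil_append]
  have hrange : PySem.List.pyRange 1 ((lam.length:Int)+1) 1
      = (List.range lam.length).map (fun k => 1 + Int.ofNat k) := by
    rw [PySem.List.pyRange_one]
    norm_num
  congr 1
  · congr 1
    rw [hrange, List.flatMap_map]
    apply flatMap_congr_mem
    intro r hrm
    have hr : r < lam.length := List.mem_range.mp hrm
    have e1 : (1 + Int.ofNat r) - 1 = ((r:Nat):Int) := by simp
    simp only [e1, PySem.List.pyGetD_natCast, PySem.List.pySetD_natCast]
    have h2 := key lam r hr (lam.getD r 0 + 1)
    rw [← others_eq_sum' lam r hr] at h2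
    rw [show (1:Int) + Int.ofNat r = ((r:Nat):Int) + 1 by simp; ring]
    by_cases hc : is_partition (lam.set r (lam.getD r 0 + 1)) = true
    · rw [if_pos hc, if_pos (h2.mp hc)]
    · rw [if_neg hc, if_neg (fun h => hc (h2.mpr h))]
  · congr 1
    rw [hrange, List.flatMap_map]
    apply flatMap_congr_mem
    intro r hrm
    have hr : r < lam.length := List.mem_range.mp hrm
    have e1 : (1 + Int.ofNat r) - 1 = ((r:Nat):Int) := by simp
    simp only [e1, PySem.List.pyGetD_natCast, PySem.List.pySetD_natCast]
    have h2 := key lam r hr (lam.getD r 0 - 1)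
    rw [← others_eq_sum' lam r hr] at h2
    rw [show (1:Int) + Int.ofNat r = ((r:Nat):Int) + 1 by simp; ring]
    by_cases hc : is_partition (lam.set r (lam.getD r 0 - 1)) = true
    · rw [if_pos hc, if_pos (h2.mp hc)]
    · rw [if_neg hc, if_neg (fun h => hc (h2.mpr h))]

-- ===== VERDICT (by name: the statement is the Claim_ definition above) =====
theorem outer_addrem_spec : Claim_equal_outer_addrem := by
  intro lam _
  exact ports_agree lam
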